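-- pv_equiv track=rewrite | github.com/MrBrantCode/unitest_baseline | mut_generate/mist_train_taco/taco_9002/solution.py | lexicographically_minimum_shift
-- ===== SOURCE A (Python) =====
-- def lexicographically_minimum_shift(s: str) -> str:
--     s1 = ''
--     start = False
--     metka = False
--     i = 0
--
--     while i < len(s) and (not start):
--         if s[i] != 'a' and (not start):
--             s1 += chr(ord(s[i]) - 1)
--             metka = True
--         elif s[i] == 'a' and (not metka):
--             s1 += s[i]
--         elif s[i] == 'a' and metka:
--             s1 += s[i:]
--             start = True
--         i += 1
--
--     if not metka:
--         s1 = s[:-1] + 'z'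
--
--     return s1
-- ===== SOURCE B (Python) =====
-- def lexicographically_minimum_shift(s: str) -> str:
--     i = 0
--     while i < len(s) and s[i] == 'a':
--         i += 1
--     if i == len(s):
--         return s[:-1] + 'z'
--     j = i
--     while j < len(s) and s[j] != 'a':
--         j += 1
--     return s[:i] + ''.join(chr(ord(c) - 1) for c in s[i:j]) + s[j:]
-- ===== Notes on version B (the rewrite author's own statement) =====
-- stated objective: simpler
-- what changed: Replaced the flag-driven single-pass state machine (start/metka booleans with per-character appends) by explicit boundary finding: scan past leading 'a's to i, scan to the end of the non-'a' run to j, then rebuild by slicing s[:i] + decremented s[i:j] + s[j:].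
import Mathlib
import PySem

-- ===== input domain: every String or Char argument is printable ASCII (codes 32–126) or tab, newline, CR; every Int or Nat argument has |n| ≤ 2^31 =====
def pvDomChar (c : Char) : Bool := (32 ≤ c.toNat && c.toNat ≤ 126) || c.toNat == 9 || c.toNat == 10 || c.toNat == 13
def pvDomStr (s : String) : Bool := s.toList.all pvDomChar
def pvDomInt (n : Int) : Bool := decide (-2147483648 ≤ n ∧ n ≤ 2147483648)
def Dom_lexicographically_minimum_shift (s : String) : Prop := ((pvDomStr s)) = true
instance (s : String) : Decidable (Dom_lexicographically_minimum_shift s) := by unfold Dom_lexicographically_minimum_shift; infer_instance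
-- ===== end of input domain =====

-- B replaces A's flag-driven single-pass state machine by explicit boundary finding
-- (scan to i past leading 'a's, scan to j past the non-'a' run) plus slice-and-rebuild;
-- objective: simpler, same asymptotic cost.

-- ===== PORT A =====
-- chr(ord(c) - 1)  (exact on the admitted ASCII range)
def pvDec (c : Char) : Char := Char.ofNat (c.toNat - 1)

-- A's while loop: state (s1, start, metka, i); returns (s1, metka) at exit.
def pvLoopA (l : List Char) (i : Nat) (s1 : List Char) (start metka : Bool) :
    List Char × Bool :=
  if h : i < l.length ∧ start = false then
    let c := l[i]'h.1
    if (c != 'a') && (!start) then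
      pvLoopA l (i+1) (s1 ++ [pvDec c]) start true
    else if (c == 'a') && (!metka) then
      pvLoopA l (i+1) (s1 ++ [c]) start metka
    else if (c == 'a') && metka then
      pvLoopA l (i+1) (s1 ++ l.drop i) true metka
    else
      pvLoopA l (i+1) s1 start metka
  else
    (s1, metka)
termination_by l.length - i
decreasing_by all_goals omega

def lexicographically_minimum_shift (s : String) : String :=
  let r := pvLoopA s.toList 0 [] false false
  if !r.2 then String.ofList (s.toList.dropLast ++ ['z'])
  else String.ofList r.1

-- ===== PORT B =====
-- first while loop of B: smallest index ≥ i whose char is not 'a' (or length)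
def pvFindI (l : List Char) (i : Nat) : Nat :=
  if h : i < l.length then
    if l[i]'h == 'a' then pvFindI l (i+1) else i
  else i
termination_by l.length - i
decreasing_by omega

-- second while loop of B: smallest index ≥ j whose char is 'a' (or length)
def pvFindJ (l : List Char) (j : Nat) : Nat :=
  if h : j < l.length then
    if l[j]'h != 'a' then pvFindJ l (j+1) else j
  else j
termination_by l.length - j
decreasing_by omega

def lexicographically_minimum_shift_alt (s : String) : String :=
  let l := s.toList
  let i := pvFindI l 0
  if i = l.length then String.ofList (l.dropLast ++ ['z'])
  else
    let j := pvFindJ l i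
    String.ofList (l.take i ++ ((l.drop i).take (j - i)).map pvDec ++ l.drop j)

-- ===== PRECONDITION & SPEC =====
def Spec_lexicographically_minimum_shift (s : String) (out : String) : Prop := out = lexicographically_minimum_shift_alt s
instance (s : String) (out : String) : Decidable (Spec_lexicographically_minimum_shift s out) := by unfold Spec_lexicographically_minimum_shift; infer_instance

-- ===== CLAIM (what is proved, stated in full; the proofs are below) =====
def Claim_equal_lexicographically_minimum_shift : Prop := ∀ (s : String), Dom_lexicographically_minimum_shift s → Spec_lexicographically_minimum_shift s (lexicographically_minimum_shift s)

-- ===== LEMMAS AND PROOFS =====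

-- phase with metka = true: decrement the non-'a' run, then append the rest verbatim
theorem pvLoopA_metka (l : List Char) :
    ∀ n i s1, l.length - i ≤ n →
      pvLoopA l i s1 false true =
        (s1 ++ ((l.drop i).takeWhile (fun c => c != 'a')).map pvDec
            ++ l.drop (i + ((l.drop i).takeWhile (fun c => c != 'a')).length), true) := by
  intro n
  induction n with
  | zero =>
    intro i s1 h
    have hi : l.length ≤ i := by omega
    rw [pvLoopA]
    simp [List.drop_eq_nil_of_le hi, Nat.not_lt_of_le hi]
  | succ n IH =>
    intro i s1 h
    by_cases hi : i < l.length
    · have hd : l.drop i = l[i] :: l.drop (i+1) := List.drop_eq_getElem_cons hi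
      by_cases ha : l[i] = 'a'
      · -- the 'a' ends the run: append the rest and stop
        rw [pvLoopA, dif_pos (And.intro hi rfl)]
        simp only [ha, bne_self_eq_false, Bool.not_true, Bool.false_and, Bool.and_false,
          Bool.false_eq_true, if_false, beq_self_eq_true, if_true,
          Bool.and_true]
        rw [pvLoopA]
        simp [hd, ha]
      · -- decrement and continue
        rw [pvLoopA, dif_pos (And.intro hi rfl)]
        have hne : (l[i] != 'a') = true := by simp [ha]
        simp only [hne, Bool.not_false, Bool.true_and, if_true]
        rw [IH (i+1) (s1 ++ [pvDec (l[i]'hi)]) (by omega), hd]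
        simp only [List.takeWhile_cons, hne, if_true, List.map_cons, List.length_cons,
          List.append_assoc, List.cons_append]
        simp only [List.nil_append]
        have harith : i + 1 + (List.takeWhile (fun c => c != 'a') (List.drop (i + 1) l)).length
            = i + ((List.takeWhile (fun c => c != 'a') (List.drop (i + 1) l)).length + 1) := by omega
        rw [harith]
    · have hle : l.length ≤ i := by omega
      rw [pvLoopA]
      simp [List.drop_eq_nil_of_le hle, Nat.not_lt_of_le hle]

-- full closed form of A's loop from the initial state
theorem pvLoopA_start (l : List Char) :
    ∀ n i s1, l.length - i ≤ n →
      pvLoopA l i s1 false false =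
        (if (l.drop i).all (fun c => c == 'a') then (s1 ++ l.drop i, false)
         else
           ((s1 ++ (l.drop i).takeWhile (fun c => c == 'a'))
              ++ ((l.drop (i + ((l.drop i).takeWhile (fun c => c == 'a')).length)).takeWhile (fun c => c != 'a')).map pvDec
              ++ l.drop (i + ((l.drop i).takeWhile (fun c => c == 'a')).length
                    + ((l.drop (i + ((l.drop i).takeWhile (fun c => c == 'a')).length)).takeWhile (fun c => c != 'a')).length),
            true)) := by
  intro n
  induction n with
  | zero =>
    intro i s1 h
    have hi : l.length ≤ i := by omega
    rw [pvLoopA]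
    simp [List.drop_eq_nil_of_le hi, Nat.not_lt_of_le hi]
  | succ n IH =>
    intro i s1 h
    by_cases hi : i < l.length
    · have hd : l.drop i = l[i] :: l.drop (i+1) := List.drop_eq_getElem_cons hi
      by_cases ha : l[i] = 'a'
      · -- copy the leading 'a' and continue
        rw [pvLoopA, dif_pos (And.intro hi rfl)]
        have hd' : l.drop i = 'a' :: l.drop (i+1) := by rw [hd, ha]
        simp only [ha, bne_self_eq_false, Bool.false_eq_true, if_false,
          beq_self_eq_true, Bool.not_false, Bool.and_true, Bool.true_and, if_true]
        rw [IH (i+1) (s1 ++ ['a']) (by omega), hd']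
        simp only [List.all_cons, beq_self_eq_true, Bool.true_and, List.takeWhile_cons,
          if_true, List.length_cons, List.append_assoc, List.cons_append, List.nil_append]
        by_cases hall : (l.drop (i+1)).all (fun c => c == 'a') = true
        · simp [hall]
        · simp only [hall, if_false, Bool.false_eq_true]
          have h1 : i + 1 + (List.takeWhile (fun c => c == 'a') (List.drop (i + 1) l)).length
              = i + ((List.takeWhile (fun c => c == 'a') (List.drop (i + 1) l)).length + 1) := by omega
          rw [h1]
      · -- first non-'a': decrement, set metka, continue in the metka phase
        rw [pvLoopA, dif_pos (And.intro hi rfl)]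
        have hne : (l[i] != 'a') = true := by simp [ha]
        simp only [hne, Bool.not_false, Bool.true_and, if_true]
        rw [pvLoopA_metka l n (i+1) (s1 ++ [pvDec (l[i]'hi)]) (by omega), hd]
        have hba : ((l[i] : Char) == 'a') = false := by simp [ha]
        simp only [List.all_cons, hba, Bool.false_and, Bool.false_eq_true, if_false,
          List.takeWhile_cons, List.length_nil, Nat.add_zero,
          List.append_assoc, List.cons_append, List.nil_append]
        have h1 : i + 1 + (List.takeWhile (fun c => c != 'a') (List.drop (i + 1) l)).length
            = i + ((List.takeWhile (fun c => c != 'a') (List.drop (i + 1) l)).length + 1) := by omega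
        rw [h1, hd]
        simp only [List.takeWhile_cons, hne, if_true, List.map_cons, List.length_cons,
          List.cons_append]
    · have hle : l.length ≤ i := by omega
      rw [pvLoopA]
      simp [List.drop_eq_nil_of_le hle, Nat.not_lt_of_le hle]

theorem pvFindI_spec (l : List Char) :
    ∀ n i, l.length - i ≤ n →
      pvFindI l i = i + ((l.drop i).takeWhile (fun c => c == 'a')).length := by
  intro n
  induction n with
  | zero =>
    intro i h
    have hi : l.length ≤ i := by omega
    rw [pvFindI]
    simp [List.drop_eq_nil_of_le hi, Nat.not_lt_of_le hi]
  | succ n IH =>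
    intro i h
    by_cases hi : i < l.length
    · have hd : l.drop i = l[i] :: l.drop (i+1) := List.drop_eq_getElem_cons hi
      rw [pvFindI, dif_pos hi, hd]
      by_cases ha : l[i] = 'a'
      · have hba : ((l[i] : Char) == 'a') = true := by simp [ha]
        simp only [hba, if_true, List.takeWhile_cons, List.length_cons]
        rw [IH (i+1) (by omega)]
        omega
      · have hba : ((l[i] : Char) == 'a') = false := by simp [ha]
        simp [hba]
    · have hle : l.length ≤ i := by omega
      rw [pvFindI]
      simp [List.drop_eq_nil_of_le hle, Nat.not_lt_of_le hle]

theorem pvFindJ_spec (l : List Char) :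
    ∀ n j, l.length - j ≤ n →
      pvFindJ l j = j + ((l.drop j).takeWhile (fun c => c != 'a')).length := by
  intro n
  induction n with
  | zero =>
    intro j h
    have hj : l.length ≤ j := by omega
    rw [pvFindJ]
    simp [List.drop_eq_nil_of_le hj, Nat.not_lt_of_le hj]
  | succ n IH =>
    intro j h
    by_cases hj : j < l.length
    · have hd : l.drop j = l[j] :: l.drop (j+1) := List.drop_eq_getElem_cons hj
      rw [pvFindJ, dif_pos hj, hd]
      by_cases ha : l[j] = 'a'
      · have hba : ((l[j] : Char) != 'a') = false := by simp [ha]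
        simp [hba]
      · have hba : ((l[j] : Char) != 'a') = true := by simp [ha]
        simp only [hba, if_true, List.takeWhile_cons, List.length_cons]
        rw [IH (j+1) (by omega)]
        omega
    · have hle : l.length ≤ j := by omega
      rw [pvFindJ]
      simp [List.drop_eq_nil_of_le hle, Nat.not_lt_of_le hle]

-- ===== VERDICT (by name: the statement is the Claim_ definition above) =====
theorem lexicographically_minimum_shift_spec : Claim_equal_lexicographically_minimum_shift := by
  unfold Claim_equal_lexicographically_minimum_shift Spec_lexicographically_minimum_shift
  intro s _hdom
  unfold lexicographically_minimum_shift lexicographically_minimum_shift_alt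
  have hstart := pvLoopA_start s.toList s.toList.length 0 [] (by omega)
  have hfi := pvFindI_spec s.toList s.toList.length 0 (by omega)
  simp only [List.drop_zero, List.nil_append, Nat.zero_add] at hstart hfi
  by_cases hall : s.toList.all (fun c => c == 'a') = true
  · rw [hstart, if_pos hall]
    have hp : s.toList.takeWhile (fun c => c == 'a') = s.toList :=
      List.takeWhile_eq_self_iff.mpr (List.all_eq_true.mp hall)
    simp [hfi, hp]
  · rw [hstart, if_neg hall]
    have hne : (s.toList.takeWhile (fun c => c == 'a')).length ≠ s.toList.length := by
      intro he
      exact hall (List.all_eq_true.mpr (fun x hx =>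
        List.takeWhile_eq_self_iff.mp
          ((List.takeWhile_prefix _).eq_of_length he) x hx))
    have hfj := pvFindJ_spec s.toList s.toList.length
      ((s.toList.takeWhile (fun c => c == 'a')).length) (by omega)
    simp only [hfi, Bool.not_true, Bool.false_eq_true, if_false]
    rw [if_neg hne, hfj]
    have htake : s.toList.take ((s.toList.takeWhile (fun c => c == 'a')).length)
        = s.toList.takeWhile (fun c => c == 'a') :=
      (List.prefix_iff_eq_take.mp (List.takeWhile_prefix _)).symm
    have hrun : ∀ (t : List Char),
        t.take ((t.takeWhile (fun c => c != 'a')).length) = t.takeWhile (fun c => c != 'a') :=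
      fun t => (List.prefix_iff_eq_take.mp (List.takeWhile_prefix _)).symm
    have harith : (s.toList.takeWhile (fun c => c == 'a')).length
          + ((s.toList.drop ((s.toList.takeWhile (fun c => c == 'a')).length)).takeWhile (fun c => c != 'a')).length
          - (s.toList.takeWhile (fun c => c == 'a')).length
        = ((s.toList.drop ((s.toList.takeWhile (fun c => c == 'a')).length)).takeWhile (fun c => c != 'a')).length := by
      omega
    rw [harith, htake, hrun]
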